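-- pv_equiv track=rewrite | github.com/IMidiot/C_Stub | stub_fun.py | remove_pre_and_comment
-- ===== SOURCE A (Python) =====
-- def remove_pre_and_comment(text,p_and_c):
--     '''去除预处理、注释、字符串'''
--     no_p_and_c_text = ''
--     ch_side_list = []
--     for x in p_and_c:
--         for i in range(x[0] , x[1]+1):
--             ch_side_list.append(i)
--     for i in range(0 , len(text)):
--         if i in ch_side_list:
--             no_p_and_c_text += ' '
--         else:
--             no_p_and_c_text += text[i]
--     return no_p_and_c_text
-- ===== SOURCE B (Python) =====
-- def remove_pre_and_comment(text, p_and_c):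
--     '''Same task, different decomposition: overwrite each clamped span by slice
--     assignment instead of building an index list and scanning every character.'''
--     chars = list(text)
--     for x in p_and_c:
--         start = max(0, x[0])
--         end = min(len(text), x[1] + 1)
--         if start < end:
--             chars[start:end] = ' ' * (end - start)
--     return ''.join(chars)
-- ===== Notes on version B (the rewrite author's own statement) =====
-- stated objective: faster
-- what changed: B overwrites each clamped range directly in a char list via slice assignment instead of materialising every covered index into a list and testing membership for every character.
import Mathlib
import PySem

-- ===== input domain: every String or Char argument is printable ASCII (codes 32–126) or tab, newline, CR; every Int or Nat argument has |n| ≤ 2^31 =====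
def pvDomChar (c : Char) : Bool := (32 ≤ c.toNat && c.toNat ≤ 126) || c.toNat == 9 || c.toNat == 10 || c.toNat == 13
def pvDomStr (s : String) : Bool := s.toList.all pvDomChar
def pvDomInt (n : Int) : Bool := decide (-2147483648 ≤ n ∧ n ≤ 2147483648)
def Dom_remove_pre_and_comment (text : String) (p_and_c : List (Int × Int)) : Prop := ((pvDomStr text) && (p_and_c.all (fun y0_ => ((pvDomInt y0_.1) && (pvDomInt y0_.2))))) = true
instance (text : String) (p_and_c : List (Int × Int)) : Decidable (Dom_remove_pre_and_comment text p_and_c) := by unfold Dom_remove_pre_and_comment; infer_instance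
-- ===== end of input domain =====

-- B replaces every covered position by overwriting each clamped range in a char
-- list directly, instead of A's index list + per-character membership scan (faster).

-- ===== PORT A =====
def remove_pre_and_comment (text : String) (p_and_c : List (Int × Int)) : String :=
  let cs := text.toList
  let ch_side_list : List Int :=
    p_and_c.foldl (fun acc x => acc ++ PySem.List.pyRange x.1 (x.2 + 1) 1) []
  let out : List Char :=
    (PySem.List.pyRange 0 (cs.length : Int) 1).foldl
      (fun out i =>
        if i ∈ ch_side_list then out ++ [' ']
        else out ++ [PySem.List.pyGetD cs i ' ']) []
  String.ofList out

-- ===== PORT B =====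
def pvOverwrite (n : Int) (chars : List Char) (x : Int × Int) : List Char :=
  if max 0 x.1 < min n (x.2 + 1) then
    chars.take (max 0 x.1).toNat
      ++ List.replicate (min n (x.2 + 1) - max 0 x.1).toNat ' '
      ++ chars.drop (min n (x.2 + 1)).toNat
  else chars

def remove_pre_and_comment_alt (text : String) (p_and_c : List (Int × Int)) : String :=
  let cs := text.toList
  String.ofList (p_and_c.foldl (pvOverwrite (cs.length : Int)) cs)

-- ===== PRECONDITION & SPEC =====
def Spec_remove_pre_and_comment (text : String) (p_and_c : List (Int × Int)) (out : String) : Prop := out = remove_pre_and_comment_alt text p_and_c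
instance (text : String) (p_and_c : List (Int × Int)) (out : String) : Decidable (Spec_remove_pre_and_comment text p_and_c out) := by unfold Spec_remove_pre_and_comment; infer_instance

-- ===== CLAIM (what is proved, stated in full; the proofs are below) =====
def Claim_equal_remove_pre_and_comment : Prop := ∀ (text : String) (p_and_c : List (Int × Int)), Dom_remove_pre_and_comment text p_and_c → Spec_remove_pre_and_comment text p_and_c (remove_pre_and_comment text p_and_c)

-- ===== LEMMAS AND PROOFS =====

/-- position `i` is covered by some range of `p` -/
def pvCover (p : List (Int × Int)) (i : Int) : Bool :=
  p.any (fun x => decide (x.1 ≤ i) && decide (i ≤ x.2))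

/-- the canonical result both ports compute -/
def pvSpecList (p : List (Int × Int)) (cs : List Char) : List Char :=
  (List.range cs.length).map (fun (k : Nat) => if pvCover p (k : Int) then ' ' else cs.getD k ' ')

-- membership in A's accumulated index list
theorem pv_mem_chlist (p : List (Int × Int)) (acc : List Int) (i : Int) :
    (i ∈ p.foldl (fun acc x => acc ++ PySem.List.pyRange x.1 (x.2 + 1) 1) acc)
      ↔ i ∈ acc ∨ pvCover p i = true := by
  induction p generalizing acc with
  | nil => simp [pvCover]
  | cons x rest ih =>
      simp only [List.foldl_cons, ih, List.mem_append, PySem.List.mem_pyRange_one,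
        pvCover, List.any_cons, Bool.or_eq_true, Bool.and_eq_true, decide_eq_true_eq]
      constructor
      · rintro ((h | h) | h)
        · exact Or.inl h
        · exact Or.inr (Or.inl ⟨h.1, by omega⟩)
        · exact Or.inr (Or.inr h)
      · rintro (h | ⟨h1, h2⟩ | h)
        · exact Or.inl (Or.inl h)
        · exact Or.inl (Or.inr ⟨h1, by omega⟩)
        · exact Or.inr h

theorem pv_foldl_append_map {α β : Type} (f : α → β) (xs : List α) (acc : List β) :
    xs.foldl (fun out i => out ++ [f i]) acc = acc ++ xs.map f := by
  induction xs generalizing acc with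
  | nil => simp
  | cons a t ih => simp [ih]

theorem pv_self_eq_map_range (cs : List Char) :
    (List.range cs.length).map (fun (k : Nat) => cs.getD k ' ') = cs := by
  apply List.ext_getElem
  · simp
  · intro k h1 h2
    simp [List.getD_eq_getElem?_getD, List.getElem?_eq_getElem h2]

-- A computes pvSpecList
theorem pv_A_eq (text : String) (p : List (Int × Int)) :
    remove_pre_and_comment text p = String.ofList (pvSpecList p text.toList) := by
  unfold remove_pre_and_comment pvSpecList
  set cs := text.toList
  have hfun : (fun (out : List Char) (i : Int) =>
      if i ∈ p.foldl (fun acc x => acc ++ PySem.List.pyRange x.1 (x.2 + 1) 1) [] then out ++ [' ']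
      else out ++ [PySem.List.pyGetD cs i ' '])
      = (fun out i => out ++ [if pvCover p i then ' ' else PySem.List.pyGetD cs i ' ']) := by
    funext out i
    have hm := pv_mem_chlist p [] i
    simp only [List.not_mem_nil, false_or] at hm
    by_cases h : pvCover p i = true
    · rw [if_pos (hm.mpr h), if_pos h]
    · rw [if_neg (fun hc => h (hm.mp hc)), if_neg h]
  simp only [hfun, pv_foldl_append_map, List.nil_append]
  rw [PySem.List.pyRange_one]
  simp only [List.map_map, Function.comp_def, Int.sub_zero, Int.toNat_natCast, zero_add]
  congr 1
  apply List.map_congr_left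
  intro k _
  simp [PySem.List.pyGetD_natCast]

-- overwriting a span, read back at position k
theorem pv_getD_overwrite (cs : List Char) (s e k : Nat) (hse : s ≤ e) (he : e ≤ cs.length)
    (hk : k < cs.length) :
    (cs.take s ++ List.replicate (e - s) ' ' ++ cs.drop e).getD k ' '
      = if s ≤ k ∧ k < e then ' ' else cs.getD k ' ' := by
  have hs : s ≤ cs.length := le_trans hse he
  have hlen : (cs.take s ++ List.replicate (e - s) ' ' ++ cs.drop e).length = cs.length := by
    simp; omega
  rw [List.getD_eq_getElem?_getD, List.getElem?_eq_getElem (by omega : k < _),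
    List.getD_eq_getElem?_getD, List.getElem?_eq_getElem hk]
  simp only [Option.getD_some]
  by_cases h1 : k < s
  · rw [List.getElem_append_left (by simp; omega)]
    rw [List.getElem_append_left (by simp; omega)]
    rw [List.getElem_take]
    rw [if_neg (by omega)]
  · by_cases h2 : k < e
    · rw [List.getElem_append_left (by simp; omega)]
      rw [List.getElem_append_right (by simp; omega)]
      rw [List.getElem_replicate]
      rw [if_pos ⟨by omega, h2⟩]
    · rw [List.getElem_append_right (by simp; omega)]
      rw [if_neg (by omega)]
      simp only [List.length_append, List.length_take, List.length_replicate,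
        Nat.min_eq_left hs, List.getElem_drop]
      congr 1
      omega

theorem pv_overwrite_length (n : Int) (cs : List Char) (x : Int × Int)
    (hn : n = (cs.length : Int)) : (pvOverwrite n cs x).length = cs.length := by
  unfold pvOverwrite
  split
  · rename_i h
    simp only [List.length_append, List.length_take, List.length_replicate, List.length_drop]
    omega
  · rfl

theorem pv_getD_overwrite' (cs : List Char) (x : Int × Int) (k : Nat) (hk : k < cs.length) :
    (pvOverwrite (cs.length : Int) cs x).getD k ' '
      = if (decide (x.1 ≤ (k:Int)) && decide ((k:Int) ≤ x.2)) = true then ' '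
        else cs.getD k ' ' := by
  unfold pvOverwrite
  split
  · rename_i h
    rw [show (min ((cs.length : Int)) (x.2 + 1) - max 0 x.1).toNat
        = (min ((cs.length : Int)) (x.2 + 1)).toNat - (max 0 x.1).toNat from by omega]
    rw [pv_getD_overwrite cs (max 0 x.1).toNat (min (cs.length : Int) (x.2 + 1)).toNat k
      (by omega) (by omega) hk]
    congr 1
    simp only [Bool.and_eq_true, decide_eq_true_eq, eq_iff_iff]
    omega
  · rename_i h
    rw [if_neg]
    simp only [Bool.and_eq_true, decide_eq_true_eq, not_and]
    intro hx1 hx2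
    omega

theorem pv_B_inv (p : List (Int × Int)) (n : Nat) (cur : List Char) (hlen : cur.length = n) :
    p.foldl (pvOverwrite (n : Int)) cur
      = (List.range n).map (fun (k : Nat) => if pvCover p (k : Int) then ' ' else cur.getD k ' ') := by
  induction p generalizing cur with
  | nil =>
      simp only [List.foldl_nil, pvCover, List.any_nil, Bool.false_eq_true, if_false]
      rw [← hlen, pv_self_eq_map_range]
  | cons x rest ih =>
      simp only [List.foldl_cons]
      have hlen' : (pvOverwrite (n : Int) cur x).length = n := by
        rw [pv_overwrite_length _ _ _ (by rw [hlen]), hlen]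
      rw [ih (pvOverwrite (n : Int) cur x) hlen']
      apply List.map_congr_left
      intro k hk
      rw [List.mem_range] at hk
      have hgd : (pvOverwrite (n : Int) cur x).getD k ' '
          = if (decide (x.1 ≤ (k:Int)) && decide ((k:Int) ≤ x.2)) = true then ' '
            else cur.getD k ' ' := by
        have h := pv_getD_overwrite' cur x k (by omega)
        rw [show ((cur.length : Int)) = ((n : Int)) from by exact_mod_cast hlen] at h
        exact h
      have hcons : pvCover (x :: rest) (k : Int)
          = ((decide (x.1 ≤ (k:Int)) && decide ((k:Int) ≤ x.2)) || pvCover rest (k : Int)) := by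
        simp [pvCover]
      rw [hcons, hgd]
      by_cases hx : (decide (x.1 ≤ (k:Int)) && decide ((k:Int) ≤ x.2)) = true <;>
        by_cases hr : pvCover rest (k : Int) = true <;> simp [hx, hr]

theorem pv_B_eq (text : String) (p : List (Int × Int)) :
    remove_pre_and_comment_alt text p = String.ofList (pvSpecList p text.toList) := by
  exact congrArg String.ofList (pv_B_inv p text.toList.length text.toList rfl)

-- ===== VERDICT (by name: the statement is the Claim_ definition above) =====
theorem remove_pre_and_comment_spec : Claim_equal_remove_pre_and_comment := by
  intro text p _
  unfold Spec_remove_pre_and_comment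
  rw [pv_A_eq, pv_B_eq]
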